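-- pv_equiv track=rewrite | github.com/Komal1328/MCA-Notes | 1sem/Python/file/h6.14.py | compute
-- ===== SOURCE A (Python) =====
-- def compute(str1):
--     cntd=0
--     cntu=0
--     cntl=0
--     for i in str1:
--         if(i==" "):
--             continue
--         elif (i.isdigit()):
--             cntd=cntd+1
--         else:
--             if(i.isupper()):
--                 cntu= cntu+1
--             else:
--                 cntl=cntl+1
--     return cntd,cntu,cntl
-- ===== SOURCE B (Python) =====
-- def compute(str1):
--     hist = {}
--     for c in str1:
--         hist[c] = hist.get(c, 0) + 1
--     cntd = sum(hist.get(d, 0) for d in "0123456789")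
--     cntu = sum(hist.get(u, 0) for u in "ABCDEFGHIJKLMNOPQRSTUVWXYZ")
--     return cntd, cntu, len(str1) - hist.get(" ", 0) - cntd - cntu
-- ===== Notes on version B (the rewrite author's own statement) =====
-- stated objective: alternative
-- what changed: B builds a character-frequency dictionary in one pass and then computes the digit/uppercase buckets by summing the histogram over fixed alphabet tables, deriving the third bucket arithmetically from the total length minus spaces, digits and uppercase, instead of A's per-character three-way branching accumulator loop.
import Mathlib
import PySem

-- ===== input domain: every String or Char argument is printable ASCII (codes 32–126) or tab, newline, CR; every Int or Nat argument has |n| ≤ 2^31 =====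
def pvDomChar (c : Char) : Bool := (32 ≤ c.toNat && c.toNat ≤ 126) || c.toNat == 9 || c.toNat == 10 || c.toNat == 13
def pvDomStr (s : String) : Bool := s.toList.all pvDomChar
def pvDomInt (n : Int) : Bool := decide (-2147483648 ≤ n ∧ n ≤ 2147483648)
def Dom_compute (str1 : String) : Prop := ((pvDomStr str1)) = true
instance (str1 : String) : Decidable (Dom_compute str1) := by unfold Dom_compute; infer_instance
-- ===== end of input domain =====

-- B builds a character histogram once, reads the digit/uppercase buckets off fixed alphabet
-- tables, and derives the third bucket by subtraction (objective: alternative algorithm).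

-- ===== PORT A =====
-- one left fold over the characters carrying the three counters, branching per char as A does
def compute (str1 : String) : Int × Int × Int :=
  str1.toList.foldl
    (fun (st : Int × Int × Int) i =>
      if i = ' ' then st
      else if PySem.Chars.isdigit i then (st.1 + 1, st.2.1, st.2.2)
      else if PySem.Chars.isupper i then (st.1, st.2.1 + 1, st.2.2)
      else (st.1, st.2.1, st.2.2 + 1))
    (0, 0, 0)

-- ===== PORT B =====
def compute_alt (str1 : String) : Int × Int × Int :=
  let hist : PySem.Dict Char Int :=
    str1.toList.foldl (fun d c => d.insert c (d.getD c 0 + 1)) PySem.Dict.empty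
  let cntd : Int := ("0123456789".toList.map (fun d => hist.getD d 0)).sum
  let cntu : Int := ("ABCDEFGHIJKLMNOPQRSTUVWXYZ".toList.map (fun u => hist.getD u 0)).sum
  (cntd, cntu, (PySem.Str.len str1 : Int) - hist.getD ' ' 0 - cntd - cntu)

-- ===== PRECONDITION & SPEC =====
def Spec_compute (str1 : String) (out : Int × Int × Int) : Prop := out = compute_alt str1
instance (str1 : String) (out : Int × Int × Int) : Decidable (Spec_compute str1 out) := by unfold Spec_compute; infer_instance

-- ===== CLAIM =====
def Claim_equal_compute : Prop := ∀ (str1 : String), Dom_compute str1 → Spec_compute str1 (compute str1)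

-- ===== LEMMAS AND PROOFS =====
lemma char_eq_iff (c d : Char) : c = d ↔ c.val.toNat = d.val.toNat :=
  ⟨by rintro rfl; rfl, fun h => Char.ext (UInt32.toNat_inj.mp h)⟩

lemma digit_not_upper (c : Char) (h : PySem.Chars.isdigit c = true) : PySem.Chars.isupper c = false := by
  simp only [PySem.Chars.isdigit, Bool.and_eq_true, decide_eq_true_eq, Char.le_def,
    UInt32.le_iff_toNat_le, show '0'.val.toNat = 48 from rfl, show '9'.val.toNat = 57 from rfl] at h
  simp only [PySem.Chars.isupper, Bool.and_eq_false_iff, decide_eq_false_iff_not, Char.le_def,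
    UInt32.le_iff_toNat_le, show 'A'.val.toNat = 65 from rfl, show 'Z'.val.toNat = 90 from rfl]
  omega

lemma digit_not_space (c : Char) (h : PySem.Chars.isdigit c = true) : (c == ' ') = false := by
  simp only [PySem.Chars.isdigit, Bool.and_eq_true, decide_eq_true_eq, Char.le_def,
    UInt32.le_iff_toNat_le, show '0'.val.toNat = 48 from rfl, show '9'.val.toNat = 57 from rfl] at h
  simp only [beq_eq_false_iff_ne, ne_eq, char_eq_iff, show ' '.val.toNat = 32 from rfl]
  omega

lemma upper_not_space (c : Char) (h : PySem.Chars.isupper c = true) : (c == ' ') = false := by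
  simp only [PySem.Chars.isupper, Bool.and_eq_true, decide_eq_true_eq, Char.le_def,
    UInt32.le_iff_toNat_le, show 'A'.val.toNat = 65 from rfl, show 'Z'.val.toNat = 90 from rfl] at h
  simp only [beq_eq_false_iff_ne, ne_eq, char_eq_iff, show ' '.val.toNat = 32 from rfl]
  omega

-- A's loop characterised by three countP's
lemma compute_loop (l : List Char) (d u lo : Int) :
    l.foldl
      (fun (st : Int × Int × Int) i =>
        if i = ' ' then st
        else if PySem.Chars.isdigit i then (st.1 + 1, st.2.1, st.2.2)
        else if PySem.Chars.isupper i then (st.1, st.2.1 + 1, st.2.2)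
        else (st.1, st.2.1, st.2.2 + 1))
      (d, u, lo)
    = (d + l.countP (fun c => PySem.Chars.isdigit c),
       u + l.countP (fun c => PySem.Chars.isupper c),
       lo + l.countP (fun c => !(PySem.Chars.isupper c) && !(PySem.Chars.isdigit c) && !(c == ' '))) := by
  induction l generalizing d u lo with
  | nil => simp
  | cons c t ih =>
    simp only [List.foldl_cons, List.countP_cons]
    by_cases hs : c = ' '
    · have hdg : PySem.Chars.isdigit c = false := by
        cases h : PySem.Chars.isdigit c
        · rfl
        · exact absurd (digit_not_space c h) (by simp [hs])
      have hup : PySem.Chars.isupper c = false := by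
        cases h : PySem.Chars.isupper c
        · rfl
        · exact absurd (upper_not_space c h) (by simp [hs])
      simp [hs, ih]
    · have hns : (c == ' ') = false := by simp [hs]
      by_cases hd : PySem.Chars.isdigit c
      · have hu := digit_not_upper c hd
        simp [hs, hd, hu, hns, ih, Prod.ext_iff]; omega
      · by_cases hu : PySem.Chars.isupper c <;>
          simp [hs, hd, hu, hns, ih, Prod.ext_iff] <;> omega

lemma mem_digits_iff (c : Char) :
    decide (c ∈ "0123456789".toList) = PySem.Chars.isdigit c := by
  rw [show ("0123456789".toList) = ['0', '1', '2', '3', '4', '5', '6', '7', '8', '9'] from rfl]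
  simp only [PySem.Chars.isdigit, List.mem_cons, List.not_mem_nil, or_false, char_eq_iff,
    Char.le_def, UInt32.le_iff_toNat_le, show '0'.val.toNat = 48 from rfl,
    show '1'.val.toNat = 49 from rfl, show '2'.val.toNat = 50 from rfl,
    show '3'.val.toNat = 51 from rfl, show '4'.val.toNat = 52 from rfl,
    show '5'.val.toNat = 53 from rfl, show '6'.val.toNat = 54 from rfl,
    show '7'.val.toNat = 55 from rfl, show '8'.val.toNat = 56 from rfl,
    show '9'.val.toNat = 57 from rfl]
  rw [Bool.eq_iff_iff]
  simp only [Bool.and_eq_true, decide_eq_true_eq]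
  omega

lemma mem_uppers_iff (c : Char) :
    decide (c ∈ "ABCDEFGHIJKLMNOPQRSTUVWXYZ".toList) = PySem.Chars.isupper c := by
  rw [show ("ABCDEFGHIJKLMNOPQRSTUVWXYZ".toList)
      = ['A', 'B', 'C', 'D', 'E', 'F', 'G', 'H', 'I', 'J', 'K', 'L', 'M', 'N', 'O', 'P', 'Q',
         'R', 'S', 'T', 'U', 'V', 'W', 'X', 'Y', 'Z'] from rfl]
  simp only [PySem.Chars.isupper, List.mem_cons, List.not_mem_nil, or_false, char_eq_iff,
    Char.le_def, UInt32.le_iff_toNat_le, show 'A'.val.toNat = 65 from rfl,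
    show 'B'.val.toNat = 66 from rfl, show 'C'.val.toNat = 67 from rfl,
    show 'D'.val.toNat = 68 from rfl, show 'E'.val.toNat = 69 from rfl,
    show 'F'.val.toNat = 70 from rfl, show 'G'.val.toNat = 71 from rfl,
    show 'H'.val.toNat = 72 from rfl, show 'I'.val.toNat = 73 from rfl,
    show 'J'.val.toNat = 74 from rfl, show 'K'.val.toNat = 75 from rfl,
    show 'L'.val.toNat = 76 from rfl, show 'M'.val.toNat = 77 from rfl,
    show 'N'.val.toNat = 78 from rfl, show 'O'.val.toNat = 79 from rfl,
    show 'P'.val.toNat = 80 from rfl, show 'Q'.val.toNat = 81 from rfl,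
    show 'R'.val.toNat = 82 from rfl, show 'S'.val.toNat = 83 from rfl,
    show 'T'.val.toNat = 84 from rfl, show 'U'.val.toNat = 85 from rfl,
    show 'V'.val.toNat = 86 from rfl, show 'W'.val.toNat = 87 from rfl,
    show 'X'.val.toNat = 88 from rfl, show 'Y'.val.toNat = 89 from rfl,
    show 'Z'.val.toNat = 90 from rfl]
  rw [Bool.eq_iff_iff]
  simp only [Bool.and_eq_true, decide_eq_true_eq]
  omega

-- summing per-character counts over a duplicate-free table counts membership in the table
lemma countP_or (a : Char) (D : List Char) (ha : a ∉ D) (l : List Char) :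
    l.countP (fun c => decide (c = a) || decide (c ∈ D))
      = l.count a + l.countP (fun c => decide (c ∈ D)) := by
  induction l with
  | nil => simp
  | cons x t iht =>
    simp only [List.countP_cons, List.count_cons, iht]
    by_cases hx : x = a
    · simp [hx, ha]; omega
    · by_cases hm : x ∈ D <;> simp [hx, hm] <;> omega

lemma countP_mem_cons (a : Char) (D : List Char) (ha : a ∉ D) (l : List Char) :
    l.countP (fun c => decide (c ∈ a :: D)) = l.count a + l.countP (fun c => decide (c ∈ D)) := by
  rw [show (fun c : Char => decide (c ∈ a :: D))
      = fun c : Char => decide (c = a) || decide (c ∈ D) from funext fun c => by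
        simp [List.mem_cons]]
  exact countP_or a D ha l

lemma sum_counts (D : List Char) (hD : D.Nodup) (l : List Char) :
    (D.map (fun d => (l.count d : Int))).sum = (l.countP (fun c => decide (c ∈ D)) : Int) := by
  induction D with
  | nil => simp
  | cons a D ih =>
    simp only [List.nodup_cons] at hD
    simp only [List.map_cons, List.sum_cons, ih hD.2, countP_mem_cons a D hD.1 l]
    push_cast; ring

-- the four buckets (space / digit / upper / other) partition the characters
lemma four_way (l : List Char) :
    (l.count ' ' : Int) + l.countP (fun c => PySem.Chars.isdigit c)
      + l.countP (fun c => PySem.Chars.isupper c)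
      + l.countP (fun c => !(PySem.Chars.isupper c) && !(PySem.Chars.isdigit c) && !(c == ' '))
    = l.length := by
  induction l with
  | nil => simp
  | cons c t ih =>
    simp only [List.countP_cons, List.count_cons, List.length_cons]
    by_cases hs : c = ' '
    · have hdg : PySem.Chars.isdigit c = false := by
        cases h : PySem.Chars.isdigit c
        · rfl
        · exact absurd (digit_not_space c h) (by simp [hs])
      have hup : PySem.Chars.isupper c = false := by
        cases h : PySem.Chars.isupper c
        · rfl
        · exact absurd (upper_not_space c h) (by simp [hs])
      simp [hs, hdg, hup]; push_cast; omega
    · have hns : (c == ' ') = false := by simp [hs]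
      by_cases hd : PySem.Chars.isdigit c
      · have hu := digit_not_upper c hd
        simp [hd, hu, hns, hs]; push_cast; omega
      · by_cases hu : PySem.Chars.isupper c <;>
          simp [hd, hu, hns, hs] <;> push_cast <;> omega

-- ===== VERDICT =====
theorem compute_spec : Claim_equal_compute := by
  intro s _
  unfold Spec_compute compute compute_alt
  simp only [compute_loop, PySem.Dict.getD_foldl_insert_add_one, PySem.Dict.getD_empty,
    zero_add]
  have hd : (("0123456789".toList).map (fun d => (s.toList.count d : Int))).sum
      = (s.toList.countP (fun c => PySem.Chars.isdigit c) : Int) := by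
    rw [sum_counts _ (by decide)]
    congr 1
    exact List.countP_congr (fun c _ => by rw [mem_digits_iff c])
  have hu : (("ABCDEFGHIJKLMNOPQRSTUVWXYZ".toList).map (fun d => (s.toList.count d : Int))).sum
      = (s.toList.countP (fun c => PySem.Chars.isupper c) : Int) := by
    rw [sum_counts _ (by decide)]
    congr 1
    exact List.countP_congr (fun c _ => by rw [mem_uppers_iff c])
  have hl := four_way s.toList
  have hlen : (PySem.Str.len s : Int) = (s.toList.length : Int) := by
    simp [PySem.Str.len]
  refine Prod.ext ?_ (Prod.ext ?_ ?_)
  · simpa using hd.symm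
  · simpa using hu.symm
  · simp only [Prod.snd]
    rw [hlen, hd, hu]
    omega
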